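-- pv_equiv track=rewrite | github.com/X-BITS/python | programs/multiple occurance/multiple_occurance.py | index_differences
-- ===== SOURCE A (Python) =====
-- def index_differences(arr):
--     first_occurrence = {}
--     last_occurrence = {}
--     sum_abs_index_diff = 0
--
--     for i, num in enumerate(arr):
--         if num not in first_occurrence:
--             first_occurrence[num] = i
--         last_occurrence[num] = i
--
--     for num in set(arr):
--         sum_abs_index_diff += abs(last_occurrence[num] - first_occurrence[num])
--
--     return sum_abs_index_diff
-- ===== SOURCE B (Python) =====
-- def index_differences(arr):
--     # sum(last - first) = sum of last-occurrence indices - sum of first-occurrence indices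
--     total = 0
--     seen_first = set()
--     for i, num in enumerate(arr):
--         if num not in seen_first:
--             seen_first.add(num)
--             total -= i
--     seen_last = set()
--     for i in range(len(arr) - 1, -1, -1):
--         num = arr[i]
--         if num not in seen_last:
--             seen_last.add(num)
--             total += i
--     return total
-- ===== Notes on version B (the rewrite author's own statement) =====
-- stated objective: faster
-- what changed: Replaces the two value->index dictionaries and the per-value abs(last-first) sum over set(arr) by the identity sum(last-first)=sum(lasts)-sum(firsts): one left-to-right pass subtracts each first-occurrence index and one right-to-left pass adds each last-occurrence index, keeping only two membership sets and one scalar (abs is a no-op since last>=first).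
import Mathlib
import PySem

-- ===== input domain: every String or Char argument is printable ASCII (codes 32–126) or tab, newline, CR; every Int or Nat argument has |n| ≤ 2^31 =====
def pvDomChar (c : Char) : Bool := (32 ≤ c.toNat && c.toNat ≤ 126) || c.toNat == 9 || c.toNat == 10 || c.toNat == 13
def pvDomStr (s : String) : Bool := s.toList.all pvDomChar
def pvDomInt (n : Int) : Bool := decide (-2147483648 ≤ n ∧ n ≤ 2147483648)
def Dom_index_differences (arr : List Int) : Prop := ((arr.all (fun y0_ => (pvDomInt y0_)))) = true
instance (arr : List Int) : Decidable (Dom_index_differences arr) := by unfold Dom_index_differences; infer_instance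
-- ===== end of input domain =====

-- B replaces A's two value->index dicts and per-value abs(last-first) sum over set(arr) by
-- sum(lasts) - sum(firsts): one left-to-right pass subtracting first-occurrence indices and one
-- right-to-left pass adding last-occurrence indices, keeping only two membership sets and a scalar.

-- ===== PORT A =====
def index_differences (arr : List Int) : Int :=
  -- first_occurrence / last_occurrence built in one loop over enumerate(arr)
  let st := (PySem.List.enumerate arr 0).foldl
    (fun (st : PySem.Dict Int Int × PySem.Dict Int Int) p =>
      let fo := if !st.1.contains p.2 then st.1.insert p.2 p.1 else st.1
      (fo, st.2.insert p.2 p.1))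
    (PySem.Dict.empty, PySem.Dict.empty)
  -- sum over set(arr); both dict lookups always hit (key present), so getD's default is never used
  (PySem.Set.ofList arr).foldl
    (fun acc num => acc + |st.2.getD num 0 - st.1.getD num 0|) 0

-- ===== PORT B =====
def index_differences_alt (arr : List Int) : Int :=
  let p1 := (PySem.List.enumerate arr 0).foldl
    (fun (st : PySem.Set Int × Int) p =>
      if PySem.Set.contains st.1 p.2 then st else (PySem.Set.add st.1 p.2, st.2 - p.1))
    (PySem.Set.empty, 0)
  let p2 := (PySem.List.pyRange ((arr.length : Int) - 1) (-1) (-1)).foldl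
    (fun (st : PySem.Set Int × Int) i =>
      let num := PySem.List.pyGetD arr i 0   -- arr[i], i always in range here
      if PySem.Set.contains st.1 num then st else (PySem.Set.add st.1 num, st.2 + i))
    (PySem.Set.empty, p1.2)
  p2.2

-- ===== PRECONDITION & SPEC =====
def Spec_index_differences (arr : List Int) (out : Int) : Prop := out = index_differences_alt arr
instance (arr : List Int) (out : Int) : Decidable (Spec_index_differences arr out) := by unfold Spec_index_differences; infer_instance

-- ===== CLAIM (what is proved, stated in full; the proofs are below) =====
def Claim_equal_index_differences : Prop := ∀ (arr : List Int), Dom_index_differences arr → Spec_index_differences arr (index_differences arr)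

-- ===== LEMMAS AND PROOFS =====

-- first-occurrence index of v in arr (meaningful when v ∈ arr)
def fIdx (arr : List Int) (v : Int) : Int := (arr.idxOf v : Int)
-- last-occurrence index of v in arr (meaningful when v ∈ arr)
def lIdx (arr : List Int) (v : Int) : Int := (arr.length : Int) - 1 - (arr.reverse.idxOf v : Int)

def stepA : (PySem.Dict Int Int × PySem.Dict Int Int) → (Int × Int) → (PySem.Dict Int Int × PySem.Dict Int Int) :=
  fun st p =>
    let fo := if !st.1.contains p.2 then st.1.insert p.2 p.1 else st.1
    (fo, st.2.insert p.2 p.1)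

def dictsA (arr : List Int) : PySem.Dict Int Int × PySem.Dict Int Int :=
  (PySem.List.enumerate arr 0).foldl stepA (PySem.Dict.empty, PySem.Dict.empty)

def step1 : (PySem.Set Int × Int) → (Int × Int) → (PySem.Set Int × Int) :=
  fun st p => if PySem.Set.contains st.1 p.2 then st else (PySem.Set.add st.1 p.2, st.2 - p.1)

def step2 (arr : List Int) : (PySem.Set Int × Int) → Int → (PySem.Set Int × Int) :=
  fun st i =>
    let num := PySem.List.pyGetD arr i 0
    if PySem.Set.contains st.1 num then st else (PySem.Set.add st.1 num, st.2 + i)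

-- the reversed index list [n-1, …, 1, 0]
def revIdx : Nat → List Int
  | 0 => []
  | n + 1 => (n : Int) :: revIdx n

lemma A_eq (arr : List Int) : index_differences arr =
    ((PySem.Set.ofList arr).map
      (fun v => |(dictsA arr).2.getD v 0 - (dictsA arr).1.getD v 0|)).sum := by
  show ((PySem.Set.ofList arr).foldl
      (fun acc num => acc + |(dictsA arr).2.getD num 0 - (dictsA arr).1.getD num 0|) 0) = _
  rw [PySem.List.foldl_add]; simp

lemma alt_eq (arr : List Int) : index_differences_alt arr =
    ((PySem.List.pyRange ((arr.length : Int) - 1) (-1) (-1)).foldl (step2 arr)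
      (PySem.Set.empty, ((PySem.List.enumerate arr 0).foldl step1 (PySem.Set.empty, 0)).2)).2 := rfl

lemma idxOf_le_of_getElem : ∀ (l : List Int) (i : Nat) (h : i < l.length) (v : Int), l[i] = v → l.idxOf v ≤ i := by
  intro l
  induction l with
  | nil => intro i h; simp at h
  | cons a t ih =>
    intro i h v hv
    cases i with
    | zero => simp_all
    | succ j =>
      by_cases hva : v = a
      · simp [hva, List.idxOf_cons_self]
      · rw [List.idxOf_cons_ne _ (by simpa using (Ne.symm hva))]
        have := ih j (by simpa using h) v (by simpa using hv)
        omega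

lemma fIdx_le_lIdx (arr : List Int) (v : Int) (h : v ∈ arr) : fIdx arr v ≤ lIdx arr v := by
  have hi : arr.idxOf v < arr.length := List.idxOf_lt_length_of_mem h
  have hget : arr[arr.idxOf v]'hi = v := List.getElem_idxOf hi
  have hrev : arr.reverse[arr.length - 1 - arr.idxOf v]'(by simp; omega) = v := by
    rw [List.getElem_reverse]
    have : arr.length - 1 - (arr.length - 1 - arr.idxOf v) = arr.idxOf v := by omega
    simp [this, hget]
  have hle := idxOf_le_of_getElem arr.reverse _ (by simp; omega) v hrev
  unfold fIdx lIdx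
  omega

-- ----- characterisation of A's dicts -----

lemma dictsA_append (ys : List Int) (x : Int) :
    dictsA (ys ++ [x]) = stepA (dictsA ys) ((ys.length : Int), x) := by
  unfold dictsA
  rw [PySem.List.enumerate_append, List.foldl_append]
  simp [PySem.List.enumerate]

lemma dictsA_contains₁ (arr : List Int) : ∀ (v : Int),
    (dictsA arr).1.contains v = decide (v ∈ arr) := by
  induction arr using List.reverseRecOn with
  | nil => intro v; simp [dictsA, PySem.List.enumerate]
  | append_singleton ys x ih =>
    intro v
    rw [dictsA_append]
    unfold stepA
    by_cases hx : (dictsA ys).1.contains x = true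
    · have hxy : x ∈ ys := by rw [ih x] at hx; simpa using hx
      simp only [hx, Bool.not_true, Bool.false_eq_true, if_false]
      rw [ih v]
      by_cases hvx : v = x <;> simp [hvx, hxy]
    · simp only [Bool.not_eq_true] at hx
      simp only [hx, Bool.not_false, if_true]
      rw [PySem.Dict.contains_insert, ih v]
      by_cases hvx : v = x <;> simp [hvx]

lemma dictsA_getD₁ (arr : List Int) (v : Int) (h : v ∈ arr) :
    (dictsA arr).1.getD v 0 = fIdx arr v := by
  induction arr using List.reverseRecOn with
  | nil => simp at h
  | append_singleton ys x ih =>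
    rw [dictsA_append]
    unfold stepA
    by_cases hx : x ∈ ys
    · have hc : (dictsA ys).1.contains x = true := by rw [dictsA_contains₁]; simpa
      simp only [hc, Bool.not_true, Bool.false_eq_true, if_false]
      have hv : v ∈ ys := by
        rcases List.mem_append.mp h with h' | h'
        · exact h'
        · simp at h'; subst h'; exact hx
      rw [ih hv]
      unfold fIdx
      rw [List.idxOf_append, if_pos hv]
    · have hc : (dictsA ys).1.contains x = false := by rw [dictsA_contains₁]; simpa
      simp only [hc, Bool.not_false, if_true]
      by_cases hvx : v = x
      · subst hvx
        rw [PySem.Dict.getD_insert_self]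
        unfold fIdx
        rw [List.idxOf_append, if_neg hx]
        simp
      · have hv : v ∈ ys := by
          rcases List.mem_append.mp h with h' | h'
          · exact h'
          · simp at h'; exact absurd h' hvx
        rw [PySem.Dict.getD_insert_of_ne _ _ _ hvx, ih hv]
        unfold fIdx
        rw [List.idxOf_append, if_pos hv]

lemma dictsA_getD₂ (arr : List Int) (v : Int) (h : v ∈ arr) :
    (dictsA arr).2.getD v 0 = lIdx arr v := by
  induction arr using List.reverseRecOn with
  | nil => simp at h
  | append_singleton ys x ih =>
    rw [dictsA_append]
    unfold stepA
    by_cases hvx : v = x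
    · subst hvx
      rw [PySem.Dict.getD_insert_self]
      unfold lIdx
      rw [List.reverse_append]
      simp [List.idxOf_cons_self]
    · have hv : v ∈ ys := by
        rcases List.mem_append.mp h with h' | h'
        · exact h'
        · simp at h'; exact absurd h' hvx
      rw [PySem.Dict.getD_insert_of_ne _ _ _ hvx, ih hv]
      unfold lIdx
      rw [List.reverse_append]
      simp only [List.reverse_cons, List.reverse_nil, List.nil_append, List.singleton_append]
      rw [List.idxOf_cons_ne _ (by simpa using (Ne.symm hvx))]
      simp
      omega

-- ----- fIdx / lIdx under append -----

lemma fIdx_append_mem (ys : List Int) (x v : Int) (h : v ∈ ys) :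
    fIdx (ys ++ [x]) v = fIdx ys v := by
  unfold fIdx; rw [List.idxOf_append, if_pos h]

lemma fIdx_append_self (ys : List Int) (x : Int) (h : x ∉ ys) :
    fIdx (ys ++ [x]) x = (ys.length : Int) := by
  unfold fIdx; rw [List.idxOf_append, if_neg h]; simp

lemma lIdx_append_self (ys : List Int) (x : Int) :
    lIdx (ys ++ [x]) x = (ys.length : Int) := by
  unfold lIdx; rw [List.reverse_append]; simp [List.idxOf_cons_self]

lemma lIdx_append_ne (ys : List Int) (x v : Int) (h : v ≠ x) :
    lIdx (ys ++ [x]) v = lIdx ys v := by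
  unfold lIdx
  rw [List.reverse_append]
  simp only [List.reverse_cons, List.reverse_nil, List.nil_append, List.singleton_append]
  rw [List.idxOf_cons_ne _ (by simpa using (Ne.symm h))]
  simp
  omega

-- ----- set(arr) under append -----

lemma ofList_append (ys : List Int) (x : Int) :
    PySem.Set.ofList (ys ++ [x]) = PySem.Set.add (PySem.Set.ofList ys) x := by
  rw [PySem.Set.ofList_eq_foldl, List.foldl_append, ← PySem.Set.ofList_eq_foldl]
  rfl

lemma mem_set_ofList (ys : List Int) (v : Int) : v ∈ PySem.Set.ofList ys ↔ v ∈ ys :=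
  PySem.Set.mem_ofList ys v

lemma set_contains_eq (s : PySem.Set Int) (v : Int) :
    PySem.Set.contains s v = decide (v ∈ s) := List.contains_eq_mem v s

lemma set_add_of_mem (s : PySem.Set Int) (x : Int) (h : x ∈ s) : PySem.Set.add s x = s := by
  unfold PySem.Set.add
  rw [set_contains_eq, decide_eq_true h]
  simp

lemma set_add_of_not_mem (s : PySem.Set Int) (x : Int) (h : x ∉ s) :
    PySem.Set.add s x = s ++ [x] := by
  unfold PySem.Set.add
  rw [set_contains_eq, decide_eq_false h]
  simp

-- ----- list-sum helpers -----

lemma sum_map_sub (D : List Int) (g h : Int → Int) :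
    (D.map (fun v => g v - h v)).sum = (D.map g).sum - (D.map h).sum := by
  induction D with
  | nil => simp
  | cons a t ih => simp [ih]; ring

lemma sum_extract (g : Int → Int) (x : Int) :
    ∀ (L : List Int), L.Nodup → x ∈ L →
      (L.map g).sum = g x + ((L.filter (fun v => !(v == x))).map g).sum := by
  intro L
  induction L with
  | nil => simp
  | cons a t ih =>
    intro hnd hx
    by_cases hax : a = x
    · subst hax
      have hxt : a ∉ t := (List.nodup_cons.mp hnd).1
      have hft : t.filter (fun v => !(v == a)) = t :=
        List.filter_eq_self.mpr (fun v hv => by simp; exact fun h => hxt (h ▸ hv))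
      simp [hft]
    · have hxt : x ∈ t := List.mem_of_ne_of_mem (fun h => hax h.symm) hx
      have hrec := ih (List.nodup_cons.mp hnd).2 hxt
      have hfa : (!(a == x)) = true := by simpa using hax
      simp only [List.map_cons, List.sum_cons, hrec, List.filter_cons, hfa, if_true]
      ring

-- ----- pass 1 of B -----

lemma pass1_spec (arr : List Int) :
    (PySem.List.enumerate arr 0).foldl step1 (PySem.Set.empty, 0) =
      (PySem.Set.ofList arr, -((PySem.Set.ofList arr).map (fIdx arr)).sum) := by
  induction arr using List.reverseRecOn with
  | nil => simp [PySem.List.enumerate]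
  | append_singleton ys x ih =>
    rw [PySem.List.enumerate_append, List.foldl_append, ih]
    simp only [PySem.List.enumerate, List.foldl_cons, List.foldl_nil]
    unfold step1
    rw [ofList_append]
    by_cases hx : x ∈ ys
    · have hc : PySem.Set.contains (PySem.Set.ofList ys) x = true := by
        rw [set_contains_eq]; simp [hx]
      simp only [hc, if_true]
      rw [set_add_of_mem _ _ ((mem_set_ofList ys x).mpr hx),
        List.map_congr_left (fun v hv => fIdx_append_mem ys x v ((mem_set_ofList ys v).mp hv))]
    · have hc : PySem.Set.contains (PySem.Set.ofList ys) x = false := by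
        rw [set_contains_eq]; simp [hx]
      simp only [hc, Bool.false_eq_true, if_false]
      rw [set_add_of_not_mem _ _ (fun h => hx ((mem_set_ofList ys x).mp h))]
      congr 1
      rw [List.map_append, List.sum_append]
      have h1 : (PySem.Set.ofList ys).map (fIdx (ys ++ [x])) = (PySem.Set.ofList ys).map (fIdx ys) := by
        apply List.map_congr_left
        intro v hv
        exact fIdx_append_mem ys x v ((mem_set_ofList ys v).mp hv)
      rw [h1]
      simp [fIdx_append_self ys x hx]
      ring

-- ----- pass 2 of B -----

lemma pyRange_eq_revIdx : ∀ (n : Nat),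
    PySem.List.pyRange ((n : Int) - 1) (-1) (-1) = revIdx n := by
  intro n
  induction n with
  | zero => rw [PySem.List.pyRange_neg_one_eq_nil (by norm_num)]; rfl
  | succ m ih =>
    have h1 : ((m + 1 : Nat) : Int) - 1 = (m : Int) := by push_cast; ring
    rw [h1, PySem.List.pyRange_neg_one_cons (by omega)]
    rw [show revIdx (m + 1) = (m : Int) :: revIdx m from rfl, ih]

lemma mem_revIdx : ∀ (n : Nat) (i : Int), i ∈ revIdx n → ∃ k : Nat, k < n ∧ i = (k : Int) := by
  intro n
  induction n with
  | zero => intro i h; simp [revIdx] at h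
  | succ m ih =>
    intro i h
    rw [show revIdx (m + 1) = (m : Int) :: revIdx m from rfl] at h
    rcases List.mem_cons.mp h with h1 | h2
    · exact ⟨m, by omega, h1⟩
    · obtain ⟨k, hk, rfl⟩ := ih i h2
      exact ⟨k, by omega, rfl⟩

lemma pass2_spec (arr : List Int) :
    ∀ (s : PySem.Set Int) (t : Int),
      ((revIdx arr.length).foldl (step2 arr) (s, t)).2 =
        t + (((PySem.Set.ofList arr).filter (fun v => !PySem.Set.contains s v)).map (lIdx arr)).sum := by
  induction arr using List.reverseRecOn with
  | nil => intro s t; simp [revIdx]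
  | append_singleton ys x ih =>
    intro s t
    rw [show (ys ++ [x]).length = ys.length + 1 by simp]
    rw [show revIdx (ys.length + 1) = ((ys.length : Int)) :: revIdx ys.length from rfl]
    rw [List.foldl_cons]
    have hnum : PySem.List.pyGetD (ys ++ [x]) ((ys.length : Int)) 0 = x := by
      rw [PySem.List.pyGetD_natCast]
      simp [List.getD]
    have hcongr : ∀ (st : PySem.Set Int × Int), ∀ i ∈ revIdx ys.length,
        step2 (ys ++ [x]) st i = step2 ys st i := by
      intro st i hi
      obtain ⟨k, hk, rfl⟩ := mem_revIdx _ _ hi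
      unfold step2
      rw [PySem.List.pyGetD_natCast, PySem.List.pyGetD_natCast, List.getD_append _ _ _ _ hk]
    rw [PySem.List.foldl_congr_mem _ _ _ _ hcongr]
    have hinit : step2 (ys ++ [x]) (s, t) ((ys.length : Int)) =
        if PySem.Set.contains s x then (s, t) else (PySem.Set.add s x, t + (ys.length : Int)) := by
      unfold step2
      rw [hnum]
    rw [hinit, ofList_append]
    by_cases hc : PySem.Set.contains s x = true
    · have hxs : x ∈ s := by rw [set_contains_eq] at hc; simpa using hc
      simp only [hc, if_true]
      rw [ih s t]
      have hmap : ∀ (L : List Int), (∀ v ∈ L, v ≠ x) →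
          (L.map (lIdx ys)).sum = (L.map (lIdx (ys ++ [x]))).sum := by
        intro L hL
        rw [List.map_congr_left (fun v hv => (lIdx_append_ne ys x v (hL v hv)))]
      by_cases hx : x ∈ ys
      · rw [set_add_of_mem _ _ ((mem_set_ofList ys x).mpr hx)]
        rw [hmap _ (fun v hv => by
          have h2 := (List.mem_filter.mp hv).2
          intro he; subst he
          rw [set_contains_eq, decide_eq_true hxs] at h2; simp at h2)]
      · rw [set_add_of_not_mem _ _ (fun h => hx ((mem_set_ofList ys x).mp h))]
        rw [List.filter_append]
        have hfx : List.filter (fun v => !PySem.Set.contains s v) [x] = [] := by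
          simp [hxs]
        rw [hfx, List.append_nil]
        rw [hmap _ (fun v hv => by
          have h1 := (List.mem_filter.mp hv).1
          intro he; subst he
          exact hx ((mem_set_ofList ys v).mp h1))]
    · simp only [Bool.not_eq_true] at hc
      have hxs : x ∉ s := by rw [set_contains_eq] at hc; simpa using hc
      simp only [hc, Bool.false_eq_true, if_false]
      rw [ih (PySem.Set.add s x) (t + (ys.length : Int))]
      rw [set_add_of_not_mem s x hxs]
      have hpx : (fun v => !PySem.Set.contains s v) x = true := by
        show (!PySem.Set.contains s x) = true
        rw [set_contains_eq]; simpa using hxs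
      have hpred : ∀ v, v ≠ x →
          (!PySem.Set.contains (s ++ [x]) v) = (!PySem.Set.contains s v) := by
        intro v hvx
        rw [set_contains_eq, set_contains_eq]
        simp [List.mem_append, hvx]
      have hmap : ∀ (L : List Int), (∀ v ∈ L, v ≠ x) →
          (L.map (lIdx (ys ++ [x]))).sum = (L.map (lIdx ys)).sum := by
        intro L hL
        rw [List.map_congr_left (fun v hv => (lIdx_append_ne ys x v (hL v hv)))]
      by_cases hx : x ∈ ys
      · rw [set_add_of_mem _ _ ((mem_set_ofList ys x).mpr hx)]
        have hnd : ((PySem.Set.ofList ys).filter (fun v => !PySem.Set.contains s v)).Nodup :=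
          (PySem.Set.nodup_ofList ys).filter _
        have hxL : x ∈ (PySem.Set.ofList ys).filter (fun v => !PySem.Set.contains s v) :=
          List.mem_filter.mpr ⟨(mem_set_ofList ys x).mpr hx, hpx⟩
        rw [sum_extract (lIdx (ys ++ [x])) x _ hnd hxL, lIdx_append_self]
        have hff : ((PySem.Set.ofList ys).filter (fun v => !PySem.Set.contains s v)).filter
              (fun v => !(v == x)) =
            (PySem.Set.ofList ys).filter (fun v => !PySem.Set.contains (s ++ [x]) v) := by
          rw [List.filter_filter]
          apply List.filter_congr
          intro v _
          by_cases hvx : v = x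
          · subst hvx
            simp [List.mem_append]
          · simp only [hpred v hvx]
            simp [hvx]
        rw [hff]
        rw [hmap _ (fun v hv => by
          have h2 := (List.mem_filter.mp hv).2
          intro he; subst he
          rw [set_contains_eq] at h2
          simp [List.mem_append] at h2)]
        ring
      · rw [set_add_of_not_mem _ _ (fun h => hx ((mem_set_ofList ys x).mp h))]
        rw [List.filter_append]
        have hfx : List.filter (fun v => !PySem.Set.contains s v) [x] = [x] := by
          simp only [List.filter_cons, List.filter_nil, hpx, if_true]
        rw [hfx, List.map_append, List.sum_append]
        have hfy : (PySem.Set.ofList ys).filter (fun v => !PySem.Set.contains s v) =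
            (PySem.Set.ofList ys).filter (fun v => !PySem.Set.contains (s ++ [x]) v) := by
          apply List.filter_congr
          intro v hv
          exact (hpred v (by intro he; subst he; exact hx ((mem_set_ofList ys v).mp hv))).symm
        rw [← hfy]
        rw [hmap _ (fun v hv => by
          intro he; subst he
          exact hx ((mem_set_ofList ys v).mp (List.mem_filter.mp hv).1))]
        simp [lIdx_append_self]
        ring

-- ----- assembly -----

lemma main_eq (arr : List Int) : index_differences arr = index_differences_alt arr := by
  rw [A_eq, alt_eq, pass1_spec, pyRange_eq_revIdx arr.length]
  rw [pass2_spec arr PySem.Set.empty _]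
  have hfe : (PySem.Set.ofList arr).filter (fun v => !PySem.Set.contains PySem.Set.empty v) =
      PySem.Set.ofList arr :=
    List.filter_eq_self.mpr (fun v _ => rfl)
  rw [hfe]
  have hA : (PySem.Set.ofList arr).map
        (fun v => |(dictsA arr).2.getD v 0 - (dictsA arr).1.getD v 0|) =
      (PySem.Set.ofList arr).map (fun v => lIdx arr v - fIdx arr v) := by
    apply List.map_congr_left
    intro v hv
    have hm : v ∈ arr := (mem_set_ofList arr v).mp hv
    rw [dictsA_getD₁ _ _ hm, dictsA_getD₂ _ _ hm,
      abs_of_nonneg (by have := fIdx_le_lIdx arr v hm; omega)]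
  rw [hA, sum_map_sub]
  ring

-- ===== VERDICT (by name: the statement is the Claim_ definition above) =====
theorem index_differences_spec : Claim_equal_index_differences := by
  intro arr _
  unfold Spec_index_differences
  exact main_eq arr
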